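-- pv_equiv track=rewrite | github.com/soohyunii/algorithm | mailProgramming/algorithm21.py | sortingX
-- ===== SOURCE A (Python) =====
-- def sortingX(x,y):
--     isbool = False
--     temp = []
--     for i in range(0,len(y)):
--         for j in range(0, len(x)):
--             if x[j] == 0 :
--                 j += 1
--             elif y[i] < x[j]:
--                 temp.append(y[i])
--                 y[i] = 0
--                 break
--             elif y[i] > x[j]:
--                 temp.append(x[j])
--                 x[j] = 0
--             else:
--                 temp.append(y[i])
--                 temp.append(x[j])
--                 y[i] = 0
--                 x[j] = 0
--                 break
--             if sum(x) == 0: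
--                 isbool = True
--                 break
--         if (isbool == True and sum(y)!=0):
--             resultY = []
--             for z in range(0,len(y)):
--                 if y[z] != 0:
--                     resultY.append(y[z])
--             temp = temp + resultY
--             break
--     return temp
-- ===== SOURCE B (Python) =====
-- # Single-pass two-pointer merge; O(len(x)+len(y)) instead of A's rescan of x
-- # (and sum(x)) for every element of y. Unlike A, B does not mutate x/y in place;
-- # the equivalence claimed is about the return value only.
-- def sortingX(x, y):
--     out = []
--     i = 0
--     n = len(x)
--     for j, v in enumerate(y):
--         while i < n and x[i] < v:
--             out.append(x[i])
--             i += 1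
--         if i == n:
--             out.extend(y[j:])
--             return out
--         if x[i] == v:
--             out.append(v)
--             out.append(x[i])
--             i += 1
--         else:
--             out.append(v)
--     return out
-- ===== Notes on version B (the rewrite author's own statement) =====
-- stated objective: faster
-- what changed: Replaced A's per-y rescan of x (skipping zeroed-out slots and re-summing x after every consumption) by a single two-pointer merge that keeps an index into x, so no sentinel zeroing and no sum() rescans are needed.
-- intended difference: When x is empty and y is not, A returns [] because its flush of y's remainder is only reachable from inside the scan over x, while B returns y itself, which is what A produces whenever x is exhausted at any later point; B's value is the intended one. — e.g. on sortingX([], [1]): A returns [], B returns [1]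
-- outside the precondition, e.g. on sortingX([0], [1]): A returns [1], B returns [0, 1]; on sortingX([2, 1, -1], [3, -1, 2, -3]): A returns [2, 3, -1, 2, -3], B returns [2, 1, -1, 3, -1, 2, -3]
import Mathlib
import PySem

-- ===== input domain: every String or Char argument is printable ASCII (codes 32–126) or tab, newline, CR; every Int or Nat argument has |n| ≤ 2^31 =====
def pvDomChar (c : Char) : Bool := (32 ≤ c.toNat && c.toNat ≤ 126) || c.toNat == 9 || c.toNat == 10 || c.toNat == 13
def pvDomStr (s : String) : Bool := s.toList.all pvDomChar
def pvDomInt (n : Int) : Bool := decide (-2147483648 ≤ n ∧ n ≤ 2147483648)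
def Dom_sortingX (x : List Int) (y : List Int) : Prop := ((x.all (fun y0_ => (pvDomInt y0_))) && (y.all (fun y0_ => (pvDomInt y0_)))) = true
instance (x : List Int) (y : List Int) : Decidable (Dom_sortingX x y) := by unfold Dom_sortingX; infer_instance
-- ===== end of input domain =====

-- B replaces A's per-element rescan of x (zero sentinels + sum(x) rechecks) by a single
-- two-pointer merge; A mutates x and y in place, B does not: the equivalence proved
-- here is about the return value only.


-- ===== PORT A =====
-- inner 'for j in range(0, len(x))' loop; state (x, y, temp, isbool); the Python
-- 'j += 1' in the x[j]==0 branch is a no-op on a range-driven loop variable.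
def pvInnerA (i : Int) : List Int → List Int → List Int → List Int → Bool →
    List Int × List Int × List Int × Bool
  | [], x, y, temp, isbool => (x, y, temp, isbool)
  | j :: js, x, y, temp, isbool =>
    let xj := PySem.List.pyGetD x j 0
    let yi := PySem.List.pyGetD y i 0
    if xj = 0 then
      -- fall through to the 'if sum(x) == 0' check
      (if x.sum = 0 then (x, y, temp, true) else pvInnerA i js x y temp isbool)
    else if yi < xj then
      (x, PySem.List.pySetD y i 0, temp ++ [yi], isbool)            -- break
    else if yi > xj then
      let x' := PySem.List.pySetD x j 0
      let temp' := temp ++ [xj]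
      (if x'.sum = 0 then (x', y, temp', true)                      -- isbool; break
       else pvInnerA i js x' y temp' isbool)
    else
      (PySem.List.pySetD x j 0, PySem.List.pySetD y i 0, temp ++ [yi, xj], isbool)  -- break

-- outer 'for i in range(0, len(y))' loop; the resultY z-loop is the foldl below
def pvOuterA : List Int → List Int → List Int → List Int → Bool → List Int
  | [], _, _, temp, _ => temp
  | i :: is, x, y, temp, isbool =>
    match pvInnerA i (PySem.List.pyRange 0 x.length) x y temp isbool with
    | (x', y', temp', isbool') =>
      if isbool' = true ∧ y'.sum ≠ 0 then
        temp' ++ y'.foldl (fun acc z => if z ≠ 0 then acc ++ [z] else acc) []  -- resultY; break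
      else pvOuterA is x' y' temp' isbool'

def sortingX (x : List Int) (y : List Int) : List Int :=
  pvOuterA (PySem.List.pyRange 0 y.length) x y [] false

-- ===== PORT B =====
-- 'while i < n and x[i] < v' inner loop of Source B, walking the not-yet-passed rest of x
def pvScanB (v : Int) : List Int → Nat → List Int → Nat × List Int
  | [], i, out => (i, out)
  | u :: rest, i, out => if u < v then pvScanB v rest (i + 1) (out ++ [u]) else (i, out)

-- 'for j, v in enumerate(y)' loop of Source B (pairs (v, j) from zipIdx)
def pvLoopB (x : List Int) (y : List Int) : List (Int × Nat) → Nat → List Int → List Int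
  | [], _, out => out
  | (v, j) :: rest, i, out =>
    match pvScanB v (x.drop i) i out with
    | (i', out') =>
      if i' = x.length then out' ++ PySem.List.slice y (some (j : Int)) none   -- y[j:]
      else if x.getD i' 0 = v then pvLoopB x y rest (i' + 1) (out' ++ [v, x.getD i' 0])
      else pvLoopB x y rest i' (out' ++ [v])

def sortingX_alt (x : List Int) (y : List Int) : List Int :=
  pvLoopB x y (y.zipIdx 0) 0 []

-- ===== PRECONDITION & SPEC =====
-- Pre_ excludes inputs with a zero element or a zero-sum suffix, on which A still
-- returns: A uses 0 as its consumed-slot sentinel and sum(x)==0 / sum(y)!=0 as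
-- "all consumed" tests, so such inputs make it skip live elements, flush early or
-- drop elements — accidents of the sentinel encoding no merge would specify.
-- (second disjunct: some x[j] strictly above all of y — then x is never exhausted,
-- so A's flush and its sum(y) test are unreachable and only the x-prefix up to j matters)
def Pre_sortingX (x : List Int) (y : List Int) : Prop :=
  (∀ u ∈ x, u ≠ 0) ∧
  (((∀ v ∈ y, v ≠ 0) ∧
    (∀ m : Nat, m < x.length → 0 < m → (x.drop m).sum ≠ 0) ∧
    (∀ m : Nat, m < y.length → (y.drop m).sum ≠ 0)) ∨
   (∃ j : Nat, j < x.length ∧ (∀ v ∈ y, v < x.getD j 0) ∧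
    (∀ m : Nat, m ≤ j → 0 < m → (x.drop m).sum ≠ 0)))
instance (x : List Int) (y : List Int) : Decidable (Pre_sortingX x y) := by
  unfold Pre_sortingX; infer_instance
def pvWitness_sortingX : List Int × List Int := ([1, 3], [2, 4])

-- When x is empty and y is not, A returns [] because its flush of y's remainder is
-- only reachable from inside the scan over x, while B returns y itself — what A
-- produces whenever x is exhausted at any later point; B's value is the intended one.
def D_sortingX (x : List Int) (y : List Int) : Prop := x = [] ∧ y ≠ []
instance (x : List Int) (y : List Int) : Decidable (D_sortingX x y) := by
  unfold D_sortingX; infer_instance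

def Spec_sortingX (x : List Int) (y : List Int) (out : List Int) : Prop :=
  ¬ D_sortingX x y → out = sortingX_alt x y
instance (x : List Int) (y : List Int) (out : List Int) : Decidable (Spec_sortingX x y out) := by
  unfold Spec_sortingX; infer_instance

def pvDiffWitness_sortingX : List Int × List Int := ([], [1])
def pvDiffWitnessOut_sortingX : (List Int) × (List Int) := ([], [1])

-- ===== CLAIM =====
def Claim_unchanged_sortingX : Prop := ∀ (x : List Int) (y : List Int),
  Dom_sortingX x y → Pre_sortingX x y → Spec_sortingX x y (sortingX x y)
def Claim_changed_sortingX : Prop :=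
  Dom_sortingX (pvDiffWitness_sortingX.1) (pvDiffWitness_sortingX.2) ∧
  Pre_sortingX (pvDiffWitness_sortingX.1) (pvDiffWitness_sortingX.2) ∧
  D_sortingX (pvDiffWitness_sortingX.1) (pvDiffWitness_sortingX.2) ∧
  sortingX (pvDiffWitness_sortingX.1) (pvDiffWitness_sortingX.2) = pvDiffWitnessOut_sortingX.1 ∧
  sortingX_alt (pvDiffWitness_sortingX.1) (pvDiffWitness_sortingX.2) = pvDiffWitnessOut_sortingX.2 ∧
  pvDiffWitnessOut_sortingX.1 ≠ pvDiffWitnessOut_sortingX.2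
def Claim_exact_sortingX : Prop := ∀ (x : List Int) (y : List Int),
  Dom_sortingX x y → Pre_sortingX x y → D_sortingX x y → sortingX x y ≠ sortingX_alt x y

-- ===== LEMMAS AND PROOFS =====

-- reference merge both ports are reduced to
def pvM : List Int → List Int → List Int
  | _, [] => []
  | [], v :: ys => v :: ys
  | u :: xs, v :: ys =>
    if v < u then v :: pvM (u :: xs) ys
    else if v > u then u :: pvM xs (v :: ys)
    else v :: u :: pvM xs ys
termination_by xs ys => xs.length + ys.length

lemma pvM_nil_right (xs : List Int) : pvM xs [] = [] := by cases xs <;> simp [pvM]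

lemma pvM_flush (w : List Int) (zs ys : List Int) (v : Int) (hw : ∀ u ∈ w, u < v) :
    pvM (w ++ zs) (v :: ys) = w ++ pvM zs (v :: ys) := by
  induction w with
  | nil => simp
  | cons u w ih =>
    have hu : v > u := hw u (by simp)
    have h1 : ¬ v < u := by omega
    simp [pvM, h1, hu, ih (fun a ha => hw a (by simp [ha]))]

-- skipping the zeroed-out prefix of x (xs ≠ [], all positive: sum stays nonzero)
lemma pvInnerA_skip (i : Int) (xs : List Int) (hne : xs ≠ [])
    (y temp : List Int) : ∀ (c j k : Nat), j + c = k → (0 < c → xs.sum ≠ 0) →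
    pvInnerA i (PySem.List.pyRange (j : Int) ((k + xs.length : Nat) : Int))
      (List.replicate k 0 ++ xs) y temp false
    = pvInnerA i (PySem.List.pyRange (k : Int) ((k + xs.length : Nat) : Int))
      (List.replicate k 0 ++ xs) y temp false := by
  intro c
  induction c with
  | zero => intro j k h _; subst h; rfl
  | succ c ih =>
    intro j k h hs
    have hjk : j < k := by omega
    have hlt : (j : Int) < ((k + xs.length : Nat) : Int) := by
      push_cast; omega
    rw [PySem.List.pyRange_one_cons hlt]
    have hxj : (List.replicate k 0 ++ xs).getD j 0 = 0 := by
      simp [List.getD_eq_getElem?_getD,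
        List.getElem?_append_left (by simp [hjk] : j < (List.replicate k (0:Int)).length)]
    have hsum : (List.replicate k 0 ++ xs).sum = xs.sum := by simp
    have hs0 : xs.sum ≠ 0 := hs (by omega)
    have hcast : ((j : Int) + 1) = ((j + 1 : Nat) : Int) := by push_cast; ring
    simp only [pvInnerA, PySem.List.pyGetD_natCast, hxj, hsum, if_true]
    rw [if_neg hs0, hcast, ih (j + 1) k (by omega) (fun hc => hs (by omega))]

-- the scan once it reaches live elements of x (y's current element is v)
lemma pvInnerA_main (iN : Nat) (v : Int) (ys : List Int) :
    ∀ (xs : List Int) (k : Nat) (temp : List Int), (∀ u ∈ xs, u ≠ 0) →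
    (∀ m : Nat, 0 < m → m ≤ (xs.takeWhile (· < v)).length → m < xs.length →
      (xs.drop m).sum ≠ 0) →
    pvInnerA (iN : Int) (PySem.List.pyRange (k : Int) ((k + xs.length : Nat) : Int))
      (List.replicate k 0 ++ xs) (List.replicate iN 0 ++ v :: ys) temp false
    = (match xs.dropWhile (· < v) with
       | [] =>
         if xs.isEmpty then
           (List.replicate k 0 ++ xs, List.replicate iN 0 ++ v :: ys, temp, false)
         else
           (List.replicate (k + xs.length) 0, List.replicate iN 0 ++ v :: ys,
            temp ++ xs.takeWhile (· < v), true)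
       | u :: zs' =>
         if u = v then
           (List.replicate (k + (xs.takeWhile (· < v)).length + 1) 0 ++ zs',
            List.replicate (iN + 1) 0 ++ ys,
            temp ++ xs.takeWhile (· < v) ++ [v, u], false)
         else
           (List.replicate (k + (xs.takeWhile (· < v)).length) 0 ++ (u :: zs'),
            List.replicate (iN + 1) 0 ++ ys,
            temp ++ xs.takeWhile (· < v) ++ [v], false)) := by
  intro xs
  induction xs with
  | nil =>
    intro k temp _ _
    simp [PySem.List.pyRange_one, pvInnerA]
  | cons u rest ih =>
    intro k temp hnz hsuf
    have hu : u ≠ 0 := hnz u (by simp)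
    have hlt : (k : Int) < ((k + (u :: rest).length : Nat) : Int) := by
      simp only [List.length_cons]; push_cast; omega
    rw [PySem.List.pyRange_one_cons hlt]
    have hxj : (List.replicate k 0 ++ u :: rest).getD k 0 = u := by
      simp [List.getD_eq_getElem?_getD,
        List.getElem?_append_right (by simp : (List.replicate k (0:Int)).length ≤ k)]
    have hyi : (List.replicate iN 0 ++ v :: ys).getD iN 0 = v := by
      simp [List.getD_eq_getElem?_getD,
        List.getElem?_append_right (by simp : (List.replicate iN (0:Int)).length ≤ iN)]
    have hyset : (List.replicate iN 0 ++ v :: ys).set iN 0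
        = List.replicate (iN + 1) 0 ++ ys := by
      simp [List.set_append, List.replicate_succ']
    have hxset : (List.replicate k 0 ++ u :: rest).set k 0
        = List.replicate (k + 1) 0 ++ rest := by
      simp [List.set_append, List.replicate_succ']
    simp only [pvInnerA, PySem.List.pyGetD_natCast, PySem.List.pySetD_natCast, hxj, hyi]
    rcases lt_trichotomy v u with hc | hc | hc
    · -- y[i] < x[j]: break
      have h0 : ¬ u = 0 := hu
      have hnlt : ¬ u < v := by omega
      have hnuv : ¬ u = v := by omega
      have hw : (u :: rest).takeWhile (· < v) = [] := by
        simp [List.takeWhile_cons, hnlt]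
      have hz : (u :: rest).dropWhile (· < v) = u :: rest := by
        simp [List.dropWhile_cons, hnlt]
      simp only [if_neg h0, if_pos hc, hz, hw, if_neg hnuv]
      simp [hyset]
    · -- equal: break, zero both
      have h0 : ¬ u = 0 := hu
      have hn1 : ¬ v < u := by omega
      have hn2 : ¬ v > u := by omega
      have hnlt : ¬ u < v := by omega
      have hw : (u :: rest).takeWhile (· < v) = [] := by
        simp [List.takeWhile_cons, hnlt]
      have hz : (u :: rest).dropWhile (· < v) = u :: rest := by
        simp [List.dropWhile_cons, hnlt]
      simp only [if_neg h0, if_neg hn1, if_neg hn2, hz, hw, if_pos hc.symm]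
      simp [hyset, hxset, hc, List.replicate_succ']
    · -- y[i] > x[j]: consume x[j]
      have h0 : ¬ u = 0 := hu
      have hn1 : ¬ v < u := by omega
      have hp : v > u := hc
      have hw : (u :: rest).takeWhile (· < v) = u :: rest.takeWhile (· < v) := by
        simp [List.takeWhile_cons, hc]
      have hz : (u :: rest).dropWhile (· < v) = rest.dropWhile (· < v) := by
        simp [List.dropWhile_cons, hc]
      simp only [if_neg h0, if_neg hn1, if_pos hp, hxset, hz, hw]
      have hsum : (List.replicate (k + 1) 0 ++ rest).sum = rest.sum := by simp
      by_cases hrest : rest = []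
      · subst hrest
        simp [hsum, pvInnerA, PySem.List.pyRange_one]
      · have hrsum : rest.sum ≠ 0 := by
          have h2 := hsuf 1 (by omega) (by rw [hw]; simp)
            (by simp [List.length_pos_iff.mpr hrest])
          simpa using h2
        rw [hsum, if_neg hrsum]
        have hcast : ((k : Int) + 1) = ((k + 1 : Nat) : Int) := by push_cast; ring
        have hlen : ((k + (u :: rest).length : Nat) : Int)
            = (((k + 1) + rest.length : Nat) : Int) := by
          simp only [List.length_cons]; push_cast; ring
        rw [hcast, hlen, ih (k + 1) (temp ++ [u]) (fun a ha => hnz a (by simp [ha]))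
          (fun m h0m hle hlt' => by
            have h2 := hsuf (m + 1) (by omega) (by rw [hw]; simp; omega)
              (by simp; omega)
            simpa [List.drop_succ_cons] using h2)]
        rcases hzz : rest.dropWhile (· < v) with _ | ⟨w1, zrest⟩
        · have hine : rest ≠ [] := hrest
          have h9 : k + 1 + rest.length = k + (u :: rest).length := by
            simp only [List.length_cons]; ring
          simp only [hzz, List.isEmpty_iff, if_neg hine, h9]
          simp
        · have h9 : k + 1 + (rest.takeWhile (· < v)).length
              = k + (u :: rest.takeWhile (· < v)).length := by
            simp only [List.length_cons]; ring
          by_cases hw1 : w1 = v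
          · simp only [hzz, if_pos hw1, h9]
            simp
          · simp only [hzz, if_neg hw1, h9]
            simp

-- inner loop when x is entirely zeroed out (k > 0): first index trips sum(x)==0
lemma pvInnerA_nil (i : Int) (y temp : List Int) (k : Nat) (hk : 0 < k) :
    pvInnerA i (PySem.List.pyRange 0 (k : Int)) (List.replicate k 0) y temp false
    = (List.replicate k 0, y, temp, true) := by
  rw [PySem.List.pyRange_one_cons (by exact_mod_cast hk)]
  have h0 : (List.replicate k (0:Int)).getD 0 0 = 0 := by
    cases k with
    | zero => omega
    | succ n => simp [List.replicate_succ]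
  simp only [pvInnerA, PySem.List.pyGetD_zero, h0, if_true]
  simp

-- the resultY foldl is a nonzero filter; on a consumed prefix plus positive tail it
-- returns the tail
lemma pvFlush (iN : Nat) (v : Int) (ys : List Int) (hv : v ≠ 0) (hys : ∀ a ∈ ys, a ≠ 0) :
    (List.replicate iN 0 ++ v :: ys).foldl
      (fun acc z => if z ≠ 0 then acc ++ [z] else acc) [] = v :: ys := by
  have hfun : (fun (acc : List Int) z => if z ≠ 0 then acc ++ [z] else acc)
      = (fun acc z => if (z != 0) = true then acc ++ [id z] else acc) := by
    funext acc z; by_cases h : z = 0 <;> simp [h]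
  rw [hfun, PySem.List.foldl_append_if]
  have h1 : (v :: ys).filter (· != 0) = v :: ys := by
    apply List.filter_eq_self.mpr
    intro a ha
    rcases List.mem_cons.mp ha with h | h
    · subst h; simpa using hv
    · simpa using hys a h
  simp [List.filter_append, List.filter_replicate, h1]

lemma pvOuterA_main : ∀ (ys xs : List Int) (k iN : Nat) (temp : List Int),
    0 < k + xs.length → (∀ u ∈ xs, u ≠ 0) →
    (∀ m : Nat, m < xs.length → 0 < m → (xs.drop m).sum ≠ 0) →
    (0 < k → xs ≠ [] → xs.sum ≠ 0) →
    (∀ a ∈ ys, a ≠ 0) → (∀ m : Nat, m < ys.length → (ys.drop m).sum ≠ 0) →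
    pvOuterA (PySem.List.pyRange (iN : Int) ((iN + ys.length : Nat) : Int))
      (List.replicate k 0 ++ xs) (List.replicate iN 0 ++ ys) temp false
    = temp ++ pvM xs ys := by
  intro ys
  induction ys with
  | nil =>
    intro xs k iN temp _ _ _ _ _ _
    simp [PySem.List.pyRange_one, pvOuterA, pvM_nil_right]
  | cons v ys ih =>
    intro xs k iN temp hk hxnz hxsuf hxsum hynz hysuf
    have hv : v ≠ 0 := hynz v (by simp)
    have hynz' : ∀ a ∈ ys, a ≠ 0 := fun a ha => hynz a (by simp [ha])
    have hysuf' : ∀ m : Nat, m < ys.length → (ys.drop m).sum ≠ 0 := fun m hm => by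
      have h2 := hysuf (m + 1) (by simp; omega)
      simpa [List.drop_succ_cons] using h2
    have hlt : (iN : Int) < ((iN + (v :: ys).length : Nat) : Int) := by
      simp only [List.length_cons]; push_cast; omega
    rw [PySem.List.pyRange_one_cons hlt]
    simp only [pvOuterA]
    have hxlen : (List.replicate k (0:Int) ++ xs).length = k + xs.length := by simp
    rw [hxlen]
    have hysum : (List.replicate iN (0:Int) ++ v :: ys).sum ≠ 0 := by
      have h1 := hysuf 0 (by simp)
      simp only [List.drop_zero] at h1
      simp only [List.sum_append, List.sum_replicate, smul_zero, zero_add]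
      exact h1
    have hc1 : ((iN : Int) + 1) = ((iN + 1 : Nat) : Int) := by push_cast; ring
    have hc2 : ((iN + (v :: ys).length : Nat) : Int)
        = (((iN + 1) + ys.length : Nat) : Int) := by
      simp only [List.length_cons]; push_cast; ring
    by_cases hxe : xs = []
    · subst hxe
      have hk0 : 0 < k := by simpa using hk
      rw [List.append_nil]
      have hkc : ((k + ([] : List Int).length : Nat) : Int) = (k : Int) := by simp
      rw [hkc, pvInnerA_nil (iN : Int) _ temp k hk0]
      rw [if_pos ⟨rfl, hysum⟩, pvFlush iN v ys hv hynz']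
      simp [pvM]
    · have hskip := pvInnerA_skip (iN : Int) xs hxe
        (List.replicate iN 0 ++ v :: ys) temp k 0 k (by omega)
        (fun hc => hxsum (by omega) hxe)
      rw [Nat.cast_zero] at hskip
      rw [hskip, pvInnerA_main iN v ys xs k temp hxnz
        (fun m h0m _ hlt' => hxsuf m hlt' h0m)]
      have hsplit : xs.takeWhile (· < v) ++ xs.dropWhile (· < v) = xs :=
        List.takeWhile_append_dropWhile
      rcases hzz : xs.dropWhile (· < v) with _ | ⟨u, zs'⟩
      · -- all of x consumed below v: isbool, flush the rest of y
        have htw : xs.takeWhile (· < v) = xs := by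
          rw [hzz, List.append_nil] at hsplit; exact hsplit
        have hall : ∀ a ∈ xs, a < v := by
          intro a ha
          rw [← htw] at ha
          simpa using List.mem_takeWhile_imp ha
        simp only [hzz, List.isEmpty_iff, if_neg hxe]
        rw [if_pos ⟨trivial, hysum⟩, pvFlush iN v ys hv hynz', htw]
        have hM : pvM (xs ++ []) (v :: ys) = xs ++ pvM [] (v :: ys) :=
          pvM_flush xs [] ys v hall
        rw [List.append_nil] at hM
        rw [hM]
        simp [pvM]
      · have hul : ¬ u < v := by
          have h := List.head?_dropWhile_not (fun a : Int => decide (a < v)) xs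
          rw [hzz] at h
          simpa using h
        have htwlt : ∀ a ∈ xs.takeWhile (· < v), a < v := by
          intro a ha
          simpa using List.mem_takeWhile_imp ha
        have hxsEq : xs.takeWhile (· < v) ++ u :: zs' = xs := by
          rw [← hzz]; exact hsplit
        have hdropTw : ∀ n : Nat,
            xs.drop ((xs.takeWhile (· < v)).length + n) = (u :: zs').drop n := by
          intro n
          have h4 : xs.drop ((xs.takeWhile (· < v)).length + n)
              = (xs.takeWhile (· < v) ++ u :: zs').drop
                  ((xs.takeWhile (· < v)).length + n) := by rw [hxsEq]
          rw [h4, List.drop_append]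
          simp [Nat.add_sub_cancel_left]
        have hzpos : ∀ a ∈ u :: zs', a ≠ 0 := by
          intro a ha
          exact hxnz a ((List.dropWhile_sublist _).subset (hzz ▸ ha))
        have hlenEq : xs.length = (xs.takeWhile (· < v)).length + 1 + zs'.length := by
          conv_lhs => rw [← hxsEq]
          simp only [List.length_append, List.length_cons]
          omega
        have hzsuf : ∀ m : Nat, m < (u :: zs').length → 0 < m →
            ((u :: zs').drop m).sum ≠ 0 := by
          intro m hm h0m
          have h2 := hxsuf ((xs.takeWhile (· < v)).length + m)
            (by simp at hm; omega) (by omega)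
          rwa [hdropTw m] at h2
        have hM : pvM xs (v :: ys)
            = xs.takeWhile (· < v) ++ pvM (u :: zs') (v :: ys) := by
          conv_lhs => rw [← hsplit, hzz]
          exact pvM_flush _ _ ys v htwlt
        by_cases hw1 : u = v
        · simp only [hzz, if_pos hw1]
          rw [if_neg (by simp)]
          rw [hc1, hc2, ih zs' (k + (xs.takeWhile (· < v)).length + 1) (iN + 1)
            _ (by omega) (fun a ha => hzpos a (by simp [ha]))
            (fun m hm h0m => by
              have h2 := hzsuf (m + 1) (by simp; omega) (by omega)
              simpa [List.drop_succ_cons] using h2)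
            (fun _ hzne => by
              have h2 := hzsuf 1 (by
                simp [List.length_pos_iff.mpr hzne]) (by omega)
              simpa using h2)
            hynz' hysuf']
          rw [hM]
          have hn1 : ¬ v < u := by omega
          have hn2 : ¬ v > u := by omega
          simp [pvM, hn1, hn2, hw1]
        · have hvu : v < u := by
            rcases lt_trichotomy u v with h | h | h
            · exact absurd h hul
            · exact absurd h hw1
            · exact h
          simp only [hzz, if_neg hw1]
          rw [if_neg (by simp)]
          rw [hc1, hc2, ih (u :: zs') (k + (xs.takeWhile (· < v)).length) (iN + 1)
            _ (by simp) hzpos hzsuf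
            (fun hkw _ => by
              rcases Nat.eq_zero_or_pos (xs.takeWhile (· < v)).length with hw0 | hwpos
              · have hwnil : xs.takeWhile (· < v) = [] := List.eq_nil_of_length_eq_zero hw0
                have hxz : xs = u :: zs' := by rw [← hxsEq, hwnil]; rfl
                have := hxsum (by omega) hxe
                rwa [hxz] at this
              · have h2 := hxsuf (xs.takeWhile (· < v)).length (by omega) hwpos
                have h3 := hdropTw 0
                rw [Nat.add_zero] at h3
                simp only [List.drop_zero] at h3
                rwa [h3] at h2)
            hynz' hysuf']
          rw [hM]
          have hn2 : ¬ v > u := by omega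
          simp [pvM, hvu, hn2]

lemma pvScanB_spec (v : Int) : ∀ (d : List Int) (i : Nat) (out : List Int),
    pvScanB v d i out = (i + (d.takeWhile (· < v)).length, out ++ d.takeWhile (· < v)) := by
  intro d
  induction d with
  | nil => intro i out; simp [pvScanB]
  | cons u rest ih =>
    intro i out
    by_cases h : u < v
    · simp [pvScanB, h, ih]; omega
    · simp [pvScanB, h]

lemma pvLoopB_spec (x y : List Int) : ∀ (ys : List Int) (j i : Nat) (out : List Int),
    y.drop j = ys → i ≤ x.length →
    pvLoopB x y (ys.zipIdx j) i out = out ++ pvM (x.drop i) ys := by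
  intro ys
  induction ys with
  | nil => intro j i out _ _; simp [pvLoopB, List.zipIdx, pvM_nil_right]
  | cons v ys ih =>
    intro j i out hdrop hi
    simp only [List.zipIdx, pvLoopB, pvScanB_spec]
    set w := (x.drop i).takeWhile (fun a : Int => decide (a < v)) with hw
    set z := (x.drop i).dropWhile (fun a : Int => decide (a < v)) with hz
    have hsplit : w ++ z = x.drop i := List.takeWhile_append_dropWhile
    have hwlt : ∀ u ∈ w, u < v := fun u hu => by simpa using List.mem_takeWhile_imp hu
    have hlen : i + w.length ≤ x.length := by
      have h1 : w.length ≤ (x.drop i).length := (List.takeWhile_sublist _).length_le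
      have h2 : (x.drop i).length = x.length - i := by simp
      omega
    have hdrop2 : x.drop (i + w.length) = z := by
      have h1 : x.drop (i + w.length) = (x.drop i).drop w.length := by
        rw [List.drop_drop]
      rw [h1, ← hsplit, List.drop_left]
    have hM : pvM (x.drop i) (v :: ys) = w ++ pvM z (v :: ys) := by
      conv_lhs => rw [← hsplit]
      exact pvM_flush w z ys v hwlt
    have hdropy : y.drop (j + 1) = ys := by
      have h := congrArg List.tail hdrop
      simpa [List.tail_drop] using h
    by_cases hend : i + w.length = x.length
    · have hz0 : z = [] := by rw [← hdrop2, hend, List.drop_length]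
      rw [if_pos hend, PySem.List.slice_from_natCast, hdrop, hM, hz0]
      simp [pvM]
    · have hlt : i + w.length < x.length := lt_of_le_of_ne hlen hend
      have hzne : z ≠ [] := by
        intro h0
        rw [← hdrop2, List.drop_eq_nil_iff] at h0
        omega
      obtain ⟨u, zs', hzz⟩ := List.exists_cons_of_ne_nil hzne
      have hul : ¬ u < v := by
        have h := List.head?_dropWhile_not (fun a : Int => decide (a < v)) (x.drop i)
        rw [← hz, hzz] at h
        simpa using h
      have hget : x.getD (i + w.length) 0 = u := by
        have h3 : x[i + w.length]? = some u := by
          rw [← List.head?_drop, hdrop2, hzz]; rfl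
        simp [List.getD_eq_getElem?_getD, h3]
      rw [if_neg hend, hget]
      by_cases huv : u = v
      · rw [if_pos huv]
        rw [ih (j + 1) (i + w.length + 1) _ hdropy (by omega)]
        have hdz : x.drop (i + w.length + 1) = zs' := by
          have h1 : x.drop (i + w.length + 1) = (x.drop (i + w.length)).drop 1 := by
            rw [List.drop_drop]
          rw [h1, hdrop2, hzz, List.drop_one, List.tail_cons]
        rw [hdz, hM, hzz]
        have h1 : ¬ v < u := by omega
        have h2 : ¬ v > u := by omega
        simp [pvM, h1, h2, huv]
      · have hvu : v < u := by
          rcases lt_trichotomy u v with h | h | h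
          · exact absurd h hul
          · exact absurd h huv
          · exact h
        rw [if_neg huv]
        rw [ih (j + 1) (i + w.length) _ hdropy (by omega)]
        rw [hdrop2, hM, hzz]
        have h2 : ¬ v > u := by omega
        simp [pvM, hvu, h2]


-- outer loop when some x[j] strictly dominates every element of y: x is never
-- exhausted, the flush is unreachable, and no condition on y is needed
lemma pvOuterA_blocker : ∀ (ys xs : List Int) (jb k iN : Nat) (temp : List Int),
    jb < xs.length → (∀ v ∈ ys, v < xs.getD jb 0) →
    (∀ u ∈ xs, u ≠ 0) →
    (∀ m : Nat, m ≤ jb → 0 < m → (xs.drop m).sum ≠ 0) →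
    (0 < k → xs.sum ≠ 0) →
    pvOuterA (PySem.List.pyRange (iN : Int) ((iN + ys.length : Nat) : Int))
      (List.replicate k 0 ++ xs) (List.replicate iN 0 ++ ys) temp false
    = temp ++ pvM xs ys := by
  intro ys
  induction ys with
  | nil =>
    intro xs jb k iN temp _ _ _ _ _
    simp [PySem.List.pyRange_one, pvOuterA, pvM_nil_right]
  | cons v ys ih =>
    intro xs jb k iN temp hjb hbl hxnz hsufj hks
    have hxe : xs ≠ [] := by
      intro h0; rw [h0] at hjb; simp at hjb
    have hb : v < xs.getD jb 0 := hbl v (by simp)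
    have hbl' : ∀ w ∈ ys, w < xs.getD jb 0 := fun w hw => hbl w (by simp [hw])
    have hlt : (iN : Int) < ((iN + (v :: ys).length : Nat) : Int) := by
      simp only [List.length_cons]; push_cast; omega
    rw [PySem.List.pyRange_one_cons hlt]
    simp only [pvOuterA]
    have hxlen : (List.replicate k (0:Int) ++ xs).length = k + xs.length := by simp
    rw [hxlen]
    have hc1 : ((iN : Int) + 1) = ((iN + 1 : Nat) : Int) := by push_cast; ring
    have hc2 : ((iN + (v :: ys).length : Nat) : Int)
        = (((iN + 1) + ys.length : Nat) : Int) := by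
      simp only [List.length_cons]; push_cast; ring
    have hskip := pvInnerA_skip (iN : Int) xs hxe
      (List.replicate iN 0 ++ v :: ys) temp k 0 k (by omega)
      (fun hc => hks (by omega))
    rw [Nat.cast_zero] at hskip
    have htwle : (xs.takeWhile (· < v)).length ≤ jb := by
      by_contra hgt
      push_neg at hgt
      obtain ⟨rest, hre⟩ := (List.takeWhile_prefix (fun a : Int => decide (a < v)) (l := xs))
      have h5 : xs.getD jb 0 = (xs.takeWhile (fun a : Int => decide (a < v))).getD jb 0 := by
        conv_lhs => rw [← hre]
        exact List.getD_append _ _ _ _ hgt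
      have hmem : (xs.takeWhile (fun a : Int => decide (a < v))).getD jb 0
          ∈ xs.takeWhile (fun a : Int => decide (a < v)) := by
        rw [List.getD_eq_getElem _ _ hgt]
        exact List.getElem_mem hgt
      have h13 := List.mem_takeWhile_imp hmem
      simp only [decide_eq_true_eq] at h13
      rw [h5] at hb
      omega
    rw [hskip, pvInnerA_main iN v ys xs k temp hxnz
      (fun m h0m hle _ => hsufj m (by omega) h0m)]
    have hsplit : xs.takeWhile (· < v) ++ xs.dropWhile (· < v) = xs :=
      List.takeWhile_append_dropWhile
    rcases hzz : xs.dropWhile (· < v) with _ | ⟨u, zs'⟩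
    · -- impossible: the blocker is never consumed
      exfalso
      have h6 : xs.length = (xs.takeWhile (· < v)).length := by
        conv_lhs => rw [← hsplit, hzz]
        simp
      omega
    · have hul : ¬ u < v := by
        have h := List.head?_dropWhile_not (fun a : Int => decide (a < v)) xs
        rw [hzz] at h
        simpa using h
      have htwlt : ∀ a ∈ xs.takeWhile (· < v), a < v := by
        intro a ha
        simpa using List.mem_takeWhile_imp ha
      have hxsEq : xs.takeWhile (· < v) ++ u :: zs' = xs := by
        rw [← hzz]; exact hsplit
      have hdropTw : ∀ n : Nat,
          xs.drop ((xs.takeWhile (· < v)).length + n) = (u :: zs').drop n := by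
        intro n
        have h4 : xs.drop ((xs.takeWhile (· < v)).length + n)
            = (xs.takeWhile (· < v) ++ u :: zs').drop
                ((xs.takeWhile (· < v)).length + n) := by rw [hxsEq]
        rw [h4, List.drop_append]
        simp [Nat.add_sub_cancel_left]
      have hgetTw : ∀ n : Nat, xs.getD ((xs.takeWhile (· < v)).length + n) 0
          = (u :: zs').getD n 0 := by
        intro n
        have h7 := hdropTw n
        have h8 : (xs.drop ((xs.takeWhile (· < v)).length + n)).getD 0 0
            = ((u :: zs').drop n).getD 0 0 := by rw [h7]
        simpa [List.getD_eq_getElem?_getD, List.getElem?_drop] using h8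
      have hzpos : ∀ a ∈ u :: zs', a ≠ 0 := by
        intro a ha
        exact hxnz a ((List.dropWhile_sublist _).subset (hzz ▸ ha))
      have hlenEq : xs.length = (xs.takeWhile (· < v)).length + 1 + zs'.length := by
        conv_lhs => rw [← hxsEq]
        simp only [List.length_append, List.length_cons]
        omega
      have hM : pvM xs (v :: ys)
          = xs.takeWhile (· < v) ++ pvM (u :: zs') (v :: ys) := by
        conv_lhs => rw [← hsplit, hzz]
        exact pvM_flush _ _ ys v htwlt
      by_cases hw1 : u = v
      · -- tie: the blocker lies strictly beyond u
        have hjbgt : (xs.takeWhile (· < v)).length < jb := by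
          rcases Nat.lt_or_ge (xs.takeWhile (· < v)).length jb with h | h
          · exact h
          · exfalso
            have h9 : jb = (xs.takeWhile (· < v)).length := by omega
            have h10 := hgetTw 0
            rw [Nat.add_zero] at h10
            rw [h9, h10] at hb
            simp at hb
            omega
        simp only [hzz, if_pos hw1]
        rw [if_neg (by simp)]
        have hjb' : jb - (xs.takeWhile (· < v)).length - 1 < zs'.length := by omega
        have hgetz : zs'.getD (jb - (xs.takeWhile (· < v)).length - 1) 0
            = xs.getD jb 0 := by
          have h10 := hgetTw ((jb - (xs.takeWhile (· < v)).length - 1) + 1)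
          have h11 : (xs.takeWhile (· < v)).length
              + ((jb - (xs.takeWhile (· < v)).length - 1) + 1) = jb := by omega
          rw [h11] at h10
          simpa [List.getD_cons_succ] using h10.symm
        rw [hc1, hc2, ih zs' (jb - (xs.takeWhile (· < v)).length - 1)
          (k + (xs.takeWhile (· < v)).length + 1) (iN + 1) _ hjb'
          (fun w hw => by rw [hgetz]; exact hbl' w hw)
          (fun a ha => hzpos a (by simp [ha]))
          (fun m hle h0m => by
            have h2 := hsufj ((xs.takeWhile (· < v)).length + 1 + m) (by omega) (by omega)
            have h12 : (xs.takeWhile (· < v)).length + 1 + m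
                = (xs.takeWhile (· < v)).length + (m + 1) := by omega
            rw [h12, hdropTw (m + 1)] at h2
            simpa [List.drop_succ_cons] using h2)
          (fun _ => by
            have h2 := hsufj ((xs.takeWhile (· < v)).length + 1) (by omega) (by omega)
            rw [hdropTw 1] at h2
            simpa using h2)]
        rw [hM]
        have hn1 : ¬ v < u := by omega
        have hn2 : ¬ v > u := by omega
        simp [pvM, hn1, hn2, hw1]
      · have hvu : v < u := by
          rcases lt_trichotomy u v with h | h | h
          · exact absurd h hul
          · exact absurd h hw1
          · exact h
        simp only [hzz, if_neg hw1]
        rw [if_neg (by simp)]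
        have hjb2 : jb - (xs.takeWhile (· < v)).length < (u :: zs').length := by
          simp only [List.length_cons]; omega
        have hgetz : (u :: zs').getD (jb - (xs.takeWhile (· < v)).length) 0
            = xs.getD jb 0 := by
          have h10 := hgetTw (jb - (xs.takeWhile (· < v)).length)
          have h11 : (xs.takeWhile (· < v)).length
              + (jb - (xs.takeWhile (· < v)).length) = jb := by omega
          rw [h11] at h10
          exact h10.symm
        rw [hc1, hc2, ih (u :: zs') (jb - (xs.takeWhile (· < v)).length)
          (k + (xs.takeWhile (· < v)).length) (iN + 1) _ hjb2
          (fun w hw => by rw [hgetz]; exact hbl' w hw)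
          hzpos
          (fun m hle h0m => by
            have h2 := hsufj ((xs.takeWhile (· < v)).length + m) (by omega) (by omega)
            rw [hdropTw m] at h2
            exact h2)
          (fun hkw => by
            rcases Nat.eq_zero_or_pos (xs.takeWhile (· < v)).length with hw0 | hwpos
            · have hwnil : xs.takeWhile (· < v) = [] := List.eq_nil_of_length_eq_zero hw0
              have hxz : xs = u :: zs' := by rw [← hxsEq, hwnil]; rfl
              have := hks (by omega)
              rwa [hxz] at this
            · have h2 := hsufj (xs.takeWhile (· < v)).length (by omega) hwpos
              have h3 := hdropTw 0
              rw [Nat.add_zero] at h3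
              simp only [List.drop_zero] at h3
              rwa [h3] at h2)]
        rw [hM]
        have hn2 : ¬ v > u := by omega
        simp [pvM, hvu, hn2]

lemma alt_eq_pvM (x y : List Int) : sortingX_alt x y = pvM x y := by
  have h := pvLoopB_spec x y y 0 0 [] (by simp) (by simp)
  simpa [sortingX_alt] using h

lemma a_eq_pvM (x y : List Int) (hpre : Pre_sortingX x y)
    (hne : x ≠ []) : sortingX x y = pvM x y := by
  obtain ⟨hx, ⟨hy, hxs, hys⟩ | ⟨jb, hjb, hbl, hsufj⟩⟩ := hpre
  · have h := pvOuterA_main y x 0 0 []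
      (by cases x with | nil => exact absurd rfl hne | cons a l => simp) hx hxs
      (fun h0 _ => absurd h0 (by omega)) hy hys
    simpa [sortingX] using h
  · have h := pvOuterA_blocker y x jb 0 0 [] hjb hbl hx
      (fun m hle h0m => hsufj m hle h0m)
      (fun h0 => absurd h0 (by omega))
    simpa [sortingX] using h

-- A with empty x returns temp unchanged: the y-flush is unreachable
lemma pvOuterA_nil (y : List Int) : ∀ (is : List Int) (temp : List Int),
    pvOuterA is [] y temp false = temp := by
  intro is
  induction is with
  | nil => intro temp; simp [pvOuterA]
  | cons i is ih => intro temp; simp [pvOuterA, pvInnerA, ih]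

-- ===== VERDICT =====
theorem sortingX_spec : Claim_unchanged_sortingX := by
  intro x y _ hpre hnd
  unfold D_sortingX at hnd
  by_cases hxe : x = []
  · have hye : y = [] := by
      by_contra hy'
      exact hnd ⟨hxe, hy'⟩
    subst hxe; subst hye
    decide
  · rw [a_eq_pvM x y hpre hxe, alt_eq_pvM]

theorem sortingX_changed : Claim_changed_sortingX := by
  unfold Claim_changed_sortingX; decide

theorem sortingX_tight : Claim_exact_sortingX := by
  intro x y _ _ hd
  rcases hd with ⟨hxe, hye⟩
  subst hxe
  rw [alt_eq_pvM]
  unfold sortingX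
  rw [pvOuterA_nil y _ []]
  cases y with
  | nil => exact absurd rfl hye
  | cons v ys => simp [pvM]
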